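-- pv_equiv track=rewrite | github.com/hotsyk/kliamka | benchmark/compare_results.py | parse_test_name
-- ===== SOURCE A (Python) =====
-- def parse_test_name(name):
--     """Parse test name to extract library and operation.
--
--     Example: test_kliamka_simple_parsing -> ('kliamka', 'simple_parsing')
--     """
--     # Remove 'test_' prefix
--     name = name.replace("test_", "")
--
--     # Known libraries
--     libraries = ["kliamka", "argparse", "click", "typer"]
--
--     for lib in libraries:
--         if name.startswith(lib + "_"):
--             operation = name[len(lib) + 1:]
--             return lib, operation
--
--     return "unknown", name
-- ===== SOURCE B (Python) =====
-- KNOWN_LIBRARIES = {"kliamka", "argparse", "click", "typer"}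
--
--
-- def parse_test_name(name):
--     """Parse test name to extract library and operation.
--
--     Example: test_kliamka_simple_parsing -> ('kliamka', 'simple_parsing')
--     """
--     name = name.replace("test_", "")
--     parts = name.split("_", 1)
--     if len(parts) == 2 and parts[0] in KNOWN_LIBRARIES:
--         return parts[0], parts[1]
--     return "unknown", name
-- ===== Notes on version B (the rewrite author's own statement) =====
-- stated objective: idiomatic
-- what changed: Replaces the loop of per-library startswith prefix tests and manual index slicing with a single one-bounded split on the first underscore followed by one set-membership lookup on the head.
import Mathlib
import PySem

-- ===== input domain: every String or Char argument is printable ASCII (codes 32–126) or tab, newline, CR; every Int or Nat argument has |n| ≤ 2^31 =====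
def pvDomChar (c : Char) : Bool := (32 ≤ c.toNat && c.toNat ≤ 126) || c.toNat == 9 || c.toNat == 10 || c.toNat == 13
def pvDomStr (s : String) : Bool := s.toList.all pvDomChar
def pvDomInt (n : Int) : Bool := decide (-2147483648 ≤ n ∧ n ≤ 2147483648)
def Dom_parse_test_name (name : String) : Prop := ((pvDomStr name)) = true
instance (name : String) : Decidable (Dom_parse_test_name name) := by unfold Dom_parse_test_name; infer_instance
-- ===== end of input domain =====

-- B replaces A's loop of per-library startswith prefix tests with a single one-bounded
-- split on the first underscore plus a set-membership check on the head (idiomatic).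


-- ===== PORT A =====
-- the 'for lib in libraries' loop of A, with early return
def pvLoopA (n : String) : List String → String × String
  | [] => ("unknown", n)
  | lib :: rest =>
    if PySem.Str.startswith n (lib ++ "_") then
      (lib, PySem.Str.slice n (some (PySem.Str.len lib + 1)) none)
    else pvLoopA n rest

def parse_test_name (name : String) : String × String :=
  let n := PySem.Str.replace name "test_" ""
  pvLoopA n ["kliamka", "argparse", "click", "typer"]

-- ===== PORT B =====
def pvKnownLibraries : PySem.Set String :=
  PySem.Set.ofList ["kliamka", "argparse", "click", "typer"]

def parse_test_name_alt (name : String) : String × String :=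
  let n := PySem.Str.replace name "test_" ""
  match PySem.Str.splitMax? n "_" 1 with
  | some [head, tail] =>
      if PySem.Set.contains pvKnownLibraries head then (head, tail)
      else ("unknown", n)
  | _ => ("unknown", n)

-- ===== PRECONDITION & SPEC =====
def Spec_parse_test_name (name : String) (out : String × String) : Prop := out = parse_test_name_alt name
instance (name : String) (out : String × String) : Decidable (Spec_parse_test_name name out) := by unfold Spec_parse_test_name; infer_instance

-- ===== CLAIM (what is proved, stated in full; the proofs are below) =====
def Claim_equal_parse_test_name : Prop := ∀ (name : String), Dom_parse_test_name name → Spec_parse_test_name name (parse_test_name name)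

-- ===== LEMMAS AND PROOFS =====

-- splitOnMax.go with maxsplit budget 0 just flushes the current piece
theorem pvGo0 (fuel : Nat) (l cur : List Char) (acc : List (List Char)) :
    PySem.Chars.splitOnMax.go ['_'] (fuel + 1) 0 l cur acc
      = ((cur.reverse ++ l) :: acc).reverse := by
  cases l <;> simp [PySem.Chars.splitOnMax.go]

-- characterization of one split step on '_'
theorem pvGo1 (l : List Char) (fuel : Nat) (cur : List Char) (acc : List (List Char)) (h : l.length < fuel) :
    PySem.Chars.splitOnMax.go ['_'] fuel 1 l cur acc
      = if '_' ∈ l then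
          acc.reverse ++ [cur.reverse ++ l.takeWhile (fun c => !(c == '_')),
                          l.drop ((l.takeWhile (fun c => !(c == '_'))).length + 1)]
        else acc.reverse ++ [cur.reverse ++ l] := by
  induction l generalizing fuel cur acc with
  | nil =>
      cases fuel with
      | zero => omega
      | succ f => simp [PySem.Chars.splitOnMax.go]
  | cons c rest ih =>
      cases fuel with
      | zero => omega
      | succ f =>
        by_cases hc : c = '_'
        · subst hc
          cases f with
          | zero => simp at h
          | succ f' =>
            simp [PySem.Chars.splitOnMax.go, pvGo0, List.takeWhile]
        · have hlen : rest.length < f := by simp at h; omega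
          have hb : (!(c == '_')) = true := by simp [hc]
          simp [PySem.Chars.splitOnMax.go, Ne.symm hc, ih f (c :: cur) acc hlen,
                List.takeWhile, List.mem_cons, hb]

-- full characterization of name.split('_', 1) at the Chars level
theorem pvSplitChar (cs : List Char) :
    PySem.Chars.splitMax? cs ['_'] 1
      = some (if '_' ∈ cs then
                [cs.takeWhile (fun c => !(c == '_')),
                 cs.drop ((cs.takeWhile (fun c => !(c == '_'))).length + 1)]
              else [cs]) := by
  simp [PySem.Chars.splitMax?, PySem.Chars.splitOnMax,
        pvGo1 cs (cs.length + 1) [] [] (by omega)]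

-- a prefix containing '_' forces '_' into the string
theorem pvSwFalse (cs L : List Char) (hL : '_' ∈ L) (h : '_' ∉ cs) :
    PySem.Chars.startswith cs L = false := by
  by_contra hb
  have hpre : L <+: cs := (PySem.Chars.startswith_iff cs L).mp (by simpa using hb)
  exact h (hpre.subset hL)

theorem pvTake (L u : List Char) (hL : '_' ∉ L) :
    (L ++ '_' :: u).takeWhile (fun c => !(c == '_')) = L := by
  induction L with
  | nil => simp
  | cons c cs ih =>
      have hc : ¬ c = '_' := fun hh => hL (by simp [hh])
      have hb : (!(c == '_')) = true := by simp [hc]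
      simp [hb, ih (fun hh => hL (by simp [hh]))]

theorem pvPrefIff (L cs : List Char) (hL : '_' ∉ L) (hmem : '_' ∈ cs) :
    ((L ++ ['_']) <+: cs ↔ cs.takeWhile (fun c => !(c == '_')) = L) := by
  constructor
  · rintro ⟨u, rfl⟩
    simpa using pvTake L u hL
  · intro ht
    have hsplitcs : cs.takeWhile (fun c => !(c == '_')) ++ cs.dropWhile (fun c => !(c == '_')) = cs :=
      List.takeWhile_append_dropWhile
    have hne : cs.dropWhile (fun c => !(c == '_')) ≠ [] := by
      intro hnil
      rw [hnil, List.append_nil, ht] at hsplitcs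
      exact hL (hsplitcs ▸ hmem)
    have hhead := List.head_dropWhile_not (p := fun c => !(c == '_')) (l := cs) hne
    have hh : (cs.dropWhile (fun c => !(c == '_'))).head hne = '_' := by
      simpa using hhead
    have hcons : cs.dropWhile (fun c => !(c == '_')) =
        '_' :: (cs.dropWhile (fun c => !(c == '_'))).tail := by
      conv_lhs => rw [← List.cons_head_tail hne, hh]
    refine ⟨(cs.dropWhile (fun c => !(c == '_'))).tail, ?_⟩
    conv_rhs => rw [← hsplitcs, hcons, ht]
    simp

theorem pvCore (n : String) :
    pvLoopA n ["kliamka", "argparse", "click", "typer"]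
      = (match PySem.Str.splitMax? n "_" 1 with
         | some [head, tail] =>
             if PySem.Set.contains pvKnownLibraries head then (head, tail)
             else ("unknown", n)
         | _ => ("unknown", n)) := by
  have hsplit := PySem.Str.splitMax?_map n "_" 1
  rw [show ("_" : String).toList = ['_'] from rfl, pvSplitChar n.toList] at hsplit
  by_cases hmem : '_' ∈ n.toList
  · rw [if_pos hmem] at hsplit
    cases hq : PySem.Str.splitMax? n "_" 1 with
    | none => rw [hq] at hsplit; simp at hsplit
    | some L =>
      rw [hq] at hsplit
      simp only [Option.map_some, Option.some.injEq] at hsplit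
      obtain _ | ⟨s1, _ | ⟨s2, _ | _⟩⟩ := L
      · simp at hsplit
      · simp at hsplit
      case _ =>
        simp only [List.map_cons, List.map_nil, List.cons.injEq, and_true] at hsplit
        obtain ⟨hs1, hs2⟩ := hsplit
        have hsw : ∀ (lib : String), '_' ∉ lib.toList →
            (PySem.Chars.startswith n.toList (lib.toList ++ ['_']) = true ↔ s1 = lib) := by
          intro lib hlib
          rw [PySem.Chars.startswith_iff, pvPrefIff lib.toList n.toList hlib hmem,
              ← hs1, String.toList_inj]
        have hslice : ∀ lib : String, s1 = lib →
            PySem.Str.slice n (some (PySem.Str.len lib + 1)) none = s2 := by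
          intro lib hEq
          apply String.toList_inj.mp
          rw [PySem.Str.toList_slice, PySem.Chars.slice_eq_listSlice, PySem.Str.len_eq,
              PySem.List.slice_from _ (by omega)]
          have h1 : ((lib.toList.length : Int) + 1).toNat = lib.toList.length + 1 := by omega
          rw [h1, hs2, ← hs1, hEq]
        have hswf : ∀ lib : String, '_' ∉ lib.toList → s1 ≠ lib →
            PySem.Chars.startswith n.toList (lib.toList ++ ['_']) = false := by
          intro lib hl hne
          cases hx : PySem.Chars.startswith n.toList (lib.toList ++ ['_']) with
          | false => rfl
          | true => exact absurd ((hsw lib hl).mp hx) hne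
        by_cases h1 : s1 = "kliamka"
        · have t1 : PySem.Chars.startswith n.toList ['k','l','i','a','m','k','a','_'] = true :=
            (hsw "kliamka" (by decide)).mpr h1
          have e1 : PySem.Str.slice n (some 8) none = s2 := hslice "kliamka" h1
          simp [pvLoopA, PySem.Str.startswith_eq, t1, e1, h1, pvKnownLibraries, PySem.Set.contains]
        · have f1 : PySem.Chars.startswith n.toList ['k','l','i','a','m','k','a','_'] = false :=
            hswf "kliamka" (by decide) h1
          by_cases h2 : s1 = "argparse"
          · have t2 : PySem.Chars.startswith n.toList ['a','r','g','p','a','r','s','e','_'] = true :=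
              (hsw "argparse" (by decide)).mpr h2
            have e2 : PySem.Str.slice n (some 9) none = s2 := hslice "argparse" h2
            simp [pvLoopA, PySem.Str.startswith_eq, f1, t2, e2, h2, pvKnownLibraries, PySem.Set.contains]
          · have f2 : PySem.Chars.startswith n.toList ['a','r','g','p','a','r','s','e','_'] = false :=
              hswf "argparse" (by decide) h2
            by_cases h3 : s1 = "click"
            · have t3 : PySem.Chars.startswith n.toList ['c','l','i','c','k','_'] = true :=
                (hsw "click" (by decide)).mpr h3
              have e3 : PySem.Str.slice n (some 6) none = s2 := hslice "click" h3
              simp [pvLoopA, PySem.Str.startswith_eq, f1, f2, t3, e3, h3, pvKnownLibraries, PySem.Set.contains]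
            · have f3 : PySem.Chars.startswith n.toList ['c','l','i','c','k','_'] = false :=
                hswf "click" (by decide) h3
              by_cases h4 : s1 = "typer"
              · have t4 : PySem.Chars.startswith n.toList ['t','y','p','e','r','_'] = true :=
                  (hsw "typer" (by decide)).mpr h4
                have e4 : PySem.Str.slice n (some 6) none = s2 := hslice "typer" h4
                simp [pvLoopA, PySem.Str.startswith_eq, f1, f2, f3, t4, e4, h4, pvKnownLibraries, PySem.Set.contains]
              · have f4 : PySem.Chars.startswith n.toList ['t','y','p','e','r','_'] = false :=
                  hswf "typer" (by decide) h4
                simp [pvLoopA, PySem.Str.startswith_eq, f1, f2, f3, f4, h1, h2, h3, h4, pvKnownLibraries, PySem.Set.contains]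
      case _ => simp at hsplit
  · rw [if_neg hmem] at hsplit
    cases hq : PySem.Str.splitMax? n "_" 1 with
    | none => rw [hq] at hsplit; simp at hsplit
    | some L =>
      rw [hq] at hsplit
      simp only [Option.map_some, Option.some.injEq] at hsplit
      obtain _ | ⟨s1, _ | _⟩ := L
      · simp at hsplit
      case _ =>
        simp only [List.map_cons, List.map_nil, List.cons.injEq, and_true] at hsplit
        have hs1 : s1 = n := String.toList_inj.mp hsplit
        have f1 : PySem.Chars.startswith n.toList ['k','l','i','a','m','k','a','_'] = false :=
          pvSwFalse _ _ (by decide) hmem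
        have f2 : PySem.Chars.startswith n.toList ['a','r','g','p','a','r','s','e','_'] = false :=
          pvSwFalse _ _ (by decide) hmem
        have f3 : PySem.Chars.startswith n.toList ['c','l','i','c','k','_'] = false :=
          pvSwFalse _ _ (by decide) hmem
        have f4 : PySem.Chars.startswith n.toList ['t','y','p','e','r','_'] = false :=
          pvSwFalse _ _ (by decide) hmem
        simp [pvLoopA, PySem.Str.startswith_eq, f1, f2, f3, f4]
      case _ => simp at hsplit

theorem pvSpec (name : String) : parse_test_name name = parse_test_name_alt name :=
  pvCore (PySem.Str.replace name "test_" "")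

-- ===== VERDICT (by name: the statement is the Claim_ definition above) =====
theorem parse_test_name_spec : Claim_equal_parse_test_name := by
  intro name _
  exact pvSpec name
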